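-- pv_equiv track=rewrite | github.com/Flying-Doggy/Rosalind | scripts/KMER-k-Mer_Composition.py | generate_k_cnt_dic
-- ===== SOURCE A (Python) =====
-- def generate_k_cnt_dic( k:int ) -> dict :
--     cur = [ '' ]
--     for i in range(k):
--         next_k = []
--         for prev in cur:
--             for base in ['A' , 'T' , 'C' , 'G']:
--                 next_k.append( prev+base )
--         cur = next_k
--     return dict( zip( cur, [0]*len(cur)) )
-- ===== SOURCE B (Python) =====
-- def _kmers(n):
--     # all k-mers of length n over A,T,C,G, recursively by first base (lexicographic in ATCG order)
--     if n <= 0: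
--         return ['']
--     return [b + s for b in 'ATCG' for s in _kmers(n - 1)]
--
--
-- def generate_k_cnt_dic(k: int) -> dict:
--     return {s: 0 for s in _kmers(max(k, 0))}
-- ===== Notes on version B (the rewrite author's own statement) =====
-- stated objective: simpler
-- what changed: B generates the k-mers by direct recursion on k prepending the first base (prefix recursion), instead of A's iterative level-by-level rebuilding of the whole list with suffix appends, and builds the dict in one comprehension.
import Mathlib
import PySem

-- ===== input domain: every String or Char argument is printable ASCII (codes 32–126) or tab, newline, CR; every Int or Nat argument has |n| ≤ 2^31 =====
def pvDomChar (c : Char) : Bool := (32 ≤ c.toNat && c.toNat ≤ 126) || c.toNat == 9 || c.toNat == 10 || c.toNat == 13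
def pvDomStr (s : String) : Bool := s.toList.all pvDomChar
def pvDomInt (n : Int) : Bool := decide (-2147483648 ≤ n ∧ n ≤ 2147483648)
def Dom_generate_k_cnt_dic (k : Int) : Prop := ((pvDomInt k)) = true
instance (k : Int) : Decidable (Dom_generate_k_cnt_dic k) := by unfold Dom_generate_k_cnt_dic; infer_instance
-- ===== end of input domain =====

-- B generates the 4^k k-mers by direct recursion on k (prepending the first base) instead of A's
-- iterative level-by-level rebuilding with suffix appends; objective: simpler. Equal return value for all k.


-- ===== PORT A =====
def generate_k_cnt_dic (k : Int) : List (String × Int) :=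
  -- cur = ['']; for i in range(k): next_k = [prev+base for prev in cur for base in 'ATCG']; cur = next_k
  let cur := (PySem.List.pyRange 0 k 1).foldl
    (fun cur _ =>
      cur.flatMap (fun prev => (["A", "T", "C", "G"] : List String).map (fun base => prev ++ base)))
    [""]
  -- dict(zip(cur, [0]*len(cur)))
  (PySem.Dict.ofList (cur.zip (List.replicate cur.length (0 : Int)))).items

-- ===== PORT B =====
-- _kmers(n): recursion on n, prepending each base to every (n-1)-mer
def pvKmersB : Nat → List String
  | 0 => [""]
  | n + 1 => (["A", "T", "C", "G"] : List String).flatMap (fun b => (pvKmersB n).map (fun s => b ++ s))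

def generate_k_cnt_dic_alt (k : Int) : List (String × Int) :=
  -- {s: 0 for s in _kmers(max(k, 0))}
  (PySem.Dict.ofList ((pvKmersB (max k 0).toNat).map (fun s => (s, (0 : Int))))).items

-- ===== PRECONDITION & SPEC =====
def Spec_generate_k_cnt_dic (k : Int) (out : List (String × Int)) : Prop := out = generate_k_cnt_dic_alt k
instance (k : Int) (out : List (String × Int)) : Decidable (Spec_generate_k_cnt_dic k out) := by unfold Spec_generate_k_cnt_dic; infer_instance

-- ===== CLAIM (what is proved, stated in full; the proofs are below) =====
def Claim_equal_generate_k_cnt_dic : Prop := ∀ (k : Int), Dom_generate_k_cnt_dic k → Spec_generate_k_cnt_dic k (generate_k_cnt_dic k)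

-- ===== LEMMAS AND PROOFS =====

-- suffix-extension of the level-n k-mers equals the (n+1)-level prefix recursion
theorem pvKmersB_succ_right (n : Nat) :
    (pvKmersB n).flatMap (fun t => (["A", "T", "C", "G"] : List String).map (fun base => t ++ base))
      = pvKmersB (n + 1) := by
  induction n with
  | zero => simp [pvKmersB]
  | succ n ih =>
    conv_lhs => rw [pvKmersB]
    conv_rhs => rw [show n + 1 + 1 = (n + 1) + 1 from rfl, pvKmersB]
    rw [List.flatMap_assoc]
    refine List.flatMap_congr (fun b _ => ?_)
    rw [← ih]
    simp only [List.flatMap_map, List.map_flatMap, List.map_map, Function.comp_def,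
      String.append_assoc]

-- A's loop, run n times, builds exactly the level-n k-mers
theorem pvLoopA (n : Nat) :
    (List.range n).foldl
      (fun cur _ =>
        cur.flatMap (fun prev => (["A", "T", "C", "G"] : List String).map (fun base => prev ++ base)))
      [""] = pvKmersB n := by
  induction n with
  | zero => rfl
  | succ n ih =>
    rw [List.range_succ, List.foldl_append, ih]
    simpa using pvKmersB_succ_right n

theorem pvZipReplicate (xs : List String) :
    xs.zip (List.replicate xs.length (0 : Int)) = xs.map (fun s => (s, (0 : Int))) := by
  induction xs with
  | nil => rfl
  | cons x xs ih => simpa [List.replicate_succ] using ih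

-- ===== VERDICT (by name: the statement is the Claim_ definition above) =====
theorem generate_k_cnt_dic_spec : Claim_equal_generate_k_cnt_dic := by
  intro k _
  have hcur : (PySem.List.pyRange 0 k 1).foldl
      (fun cur _ =>
        cur.flatMap (fun prev => (["A", "T", "C", "G"] : List String).map (fun base => prev ++ base)))
      [""] = pvKmersB (max k 0).toNat := by
    rw [PySem.List.pyRange_one 0 k, List.foldl_map,
      show (k - 0).toNat = (max k 0).toNat by omega]
    exact pvLoopA ((max k 0).toNat)
  unfold Spec_generate_k_cnt_dic generate_k_cnt_dic generate_k_cnt_dic_alt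
  simp only [hcur, pvZipReplicate]
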